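-- pv_equiv track=rewrite | github.com/blindawson/AdventOfCode | year_2023/src/day12_hot_springs.py | row_combos
-- ===== SOURCE A (Python) =====
-- from itertools import product
--
-- def row_combos(text: str):
--     q_count = text.count("?")
--     dot_hash_combinations = list(product([".", "#"], repeat=q_count))
--     row_combinations = []
--
--     for dot_hash in dot_hash_combinations:
--         row_combination = text
--         for i in dot_hash:
--             row_combination = row_combination.replace("?", i, 1)
--         row_combinations.append(row_combination)
--     return row_combinations
-- ===== SOURCE B (Python) =====
-- def row_combos(text: str):
--     # One forward pass: maintain the list of all fillings of the prefix read so
--     # far; a '?' extends each with '.' then '#' (earlier '?' varies slowest, so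
--     # the order matches A's itertools.product enumeration).
--     combos = [""]
--     for ch in text:
--         if ch == "?":
--             combos = [prefix + fill for prefix in combos for fill in ".#"]
--         else:
--             combos = [prefix + ch for prefix in combos]
--     return combos
-- ===== Notes on version B (the rewrite author's own statement) =====
-- stated objective: alternative
-- what changed: Replaces itertools.product over all 2^q tuples followed by q sequential one-shot str.replace scans per tuple with a single forward pass that keeps the list of all fillings of the prefix read so far and extends it at each character.
import Mathlib
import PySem

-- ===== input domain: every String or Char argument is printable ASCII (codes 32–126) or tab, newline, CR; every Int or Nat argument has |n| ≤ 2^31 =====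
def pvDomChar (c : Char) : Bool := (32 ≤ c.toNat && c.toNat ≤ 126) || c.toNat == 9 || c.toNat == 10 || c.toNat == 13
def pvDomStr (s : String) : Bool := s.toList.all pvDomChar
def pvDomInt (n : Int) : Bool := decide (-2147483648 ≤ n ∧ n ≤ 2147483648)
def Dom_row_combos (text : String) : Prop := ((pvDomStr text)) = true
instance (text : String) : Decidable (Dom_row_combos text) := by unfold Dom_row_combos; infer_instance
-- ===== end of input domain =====

-- B replaces A's product-of-tuples + repeated one-shot str.replace scans with a single
-- forward pass that extends the list of prefix fillings at each character; return value only.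

-- ===== PORT A =====
-- text.replace("?", i, 1): replace the FIRST occurrence only. Hand port (PySem.Str.replace
-- has no count argument); exact: scans left to right, replaces at most one '?'.
def pvReplace1 (s : List Char) (i : Char) : List Char :=
  match s with
  | [] => []
  | c :: r => if c = '?' then i :: r else c :: pvReplace1 r i

-- itertools.product([".", "#"], repeat=q) as lists of chars, in product's lexicographic
-- order (leftmost component varies slowest). Exact transliteration of product's order.
def pvProdDotHash : Nat → List (List Char)
  | 0 => [[]]
  | n + 1 => ['.', '#'].flatMap (fun x => (pvProdDotHash n).map (fun t => x :: t))

def row_combos (text : String) : List String :=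
  let qCount := text.toList.count '?'  -- text.count("?"): single-char pattern, equals char count (exact)
  let dotHashCombinations := pvProdDotHash qCount
  -- for dot_hash in …: row_combination = text; for i in dot_hash: replace("?", i, 1); append
  (dotHashCombinations.map (fun dotHash =>
      String.mk (dotHash.foldl (fun rowCombination i => pvReplace1 rowCombination i) text.toList)))

-- ===== PORT B =====
-- Source B's single forward loop over the characters; strings as char lists, String.mk at the end.
def pvStep (combos : List (List Char)) (ch : Char) : List (List Char) :=
  if ch = '?' then
    combos.flatMap (fun prefix_ => ['.', '#'].map (fun fill => prefix_ ++ [fill]))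
  else
    combos.map (fun prefix_ => prefix_ ++ [ch])

def row_combos_alt (text : String) : List String :=
  (text.toList.foldl pvStep [[]]).map String.mk

-- ===== PRECONDITION & SPEC =====
def Spec_row_combos (text : String) (out : List String) : Prop := out = row_combos_alt text
instance (text : String) (out : List String) : Decidable (Spec_row_combos text out) := by unfold Spec_row_combos; infer_instance

-- ===== CLAIM (what is proved, stated in full; the proofs are below) =====
def Claim_equal_row_combos : Prop := ∀ (text : String), Dom_row_combos text → Spec_row_combos text (row_combos text)

-- ===== LEMMAS AND PROOFS =====

-- Proof-side characterisation: the natural suffix recursion for the set of fillings.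
def pvSpecGo : List Char → List (List Char)
  | [] => [[]]
  | head :: rest =>
    if head = '?' then
      ['.', '#'].flatMap (fun c => (pvSpecGo rest).map (fun t => c :: t))
    else
      (pvSpecGo rest).map (fun t => head :: t)

-- Folding one-shot replaces over a string whose head is not '?' keeps the head.
theorem pvFoldl_replace1_cons (c : Char) (hc : ¬ c = '?') :
    ∀ (tup s : List Char),
      tup.foldl (fun rc i => pvReplace1 rc i) (c :: s)
        = c :: tup.foldl (fun rc i => pvReplace1 rc i) s := by
  intro tup
  induction tup with
  | nil => intro s; rfl
  | cons x xs ih =>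
      intro s
      simp only [List.foldl_cons, pvReplace1, if_neg hc]
      exact ih _

-- A's map-over-product equals the suffix recursion, over char lists.
theorem pvCoreA (s : List Char) :
    (pvProdDotHash (s.count '?')).map
        (fun tup => tup.foldl (fun rc i => pvReplace1 rc i) s)
      = pvSpecGo s := by
  induction s with
  | nil => rfl
  | cons c rest ih =>
      by_cases hc : c = '?'
      · subst hc
        rw [show ('?' :: rest).count '?' = rest.count '?' + 1 by simp]
        simp only [pvProdDotHash, pvSpecGo, if_pos rfl, List.map_flatMap, List.map_map]
        refine List.flatMap_congr ?_
        intro x hx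
        have hx' : ¬ x = '?' := by
          fin_cases hx <;> decide
        rw [← ih]
        simp only [List.map_map]
        refine List.map_congr_left ?_
        intro tup _
        simp only [Function.comp_def, List.foldl_cons, pvReplace1, if_pos rfl]
        exact pvFoldl_replace1_cons x hx' tup rest
      · rw [show (c :: rest).count '?' = rest.count '?' by simp [hc]]
        simp only [pvSpecGo, if_neg hc, ← ih, List.map_map]
        refine List.map_congr_left ?_
        intro tup _
        simp only [Function.comp]
        exact pvFoldl_replace1_cons c hc tup rest

-- B's forward fold equals flat-mapping the suffix recursion over the accumulator.
theorem pvCoreB (s : List Char) :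
    ∀ (accs : List (List Char)),
      s.foldl pvStep accs
        = accs.flatMap (fun p => (pvSpecGo s).map (fun t => p ++ t)) := by
  induction s with
  | nil => intro accs; simp [pvSpecGo]
  | cons c rest ih =>
      intro accs
      by_cases hc : c = '?'
      · subst hc
        simp only [List.foldl_cons, pvStep, if_pos rfl, ih, pvSpecGo]
        simp [List.flatMap_assoc, Function.comp_def, List.append_assoc]
      · simp only [List.foldl_cons, pvStep, if_neg hc, ih, pvSpecGo, if_neg hc]
        simp [List.flatMap_map, Function.comp_def, List.append_assoc]

-- ===== VERDICT (by name: the statement is the Claim_ definition above) =====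
theorem row_combos_spec : Claim_equal_row_combos := by
  intro text _
  unfold Spec_row_combos row_combos row_combos_alt
  simp only []
  rw [pvCoreB, ← pvCoreA text.toList]
  simp [Function.comp_def]
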